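-- pv_equiv track=rewrite | github.com/PeterSK-bit/advent-of-code-2023 | day-12/a.py | locate_broken_spings
-- ===== SOURCE A (Python) =====
-- def locate_broken_spings(springs: list[chr], broken_springs: int):
--     for index in range(0,len(springs)-broken_springs):
--         temp = springs[index:index+broken_springs]
--         if temp.count("#")+temp.count("?") == broken_springs:
--             if index-1 >= 0:
--                 if springs[index-1] == "#":
--                     continue
--             if index+broken_springs+1 < len(springs):
--                 if springs[index+broken_springs+1] == "#":
--                     continue
--             return index
--     return -1
-- ===== SOURCE B (Python) =====
-- def locate_broken_spings(springs: list, broken_springs: int):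
--     n = len(springs)
--     b = broken_springs
--     if b < 0:
--         return -1
--     pref = [0]
--     for s in springs:
--         pref.append(pref[-1] + (1 if s == "#" or s == "?" else 0))
--     for i in range(n - b):
--         if pref[i + b] - pref[i] != b:
--             continue
--         if i >= 1 and springs[i - 1] == "#":
--             continue
--         if i + b + 1 < n and springs[i + b + 1] == "#":
--             continue
--         return i
--     return -1
-- ===== Notes on version B (the rewrite author's own statement) =====
-- stated objective: faster
-- what changed: Replaces per-index slicing and two count() passes over each window with a prefix-sum array of good ('#'/'?') positions, testing each window in O(1).
import Mathlib
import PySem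

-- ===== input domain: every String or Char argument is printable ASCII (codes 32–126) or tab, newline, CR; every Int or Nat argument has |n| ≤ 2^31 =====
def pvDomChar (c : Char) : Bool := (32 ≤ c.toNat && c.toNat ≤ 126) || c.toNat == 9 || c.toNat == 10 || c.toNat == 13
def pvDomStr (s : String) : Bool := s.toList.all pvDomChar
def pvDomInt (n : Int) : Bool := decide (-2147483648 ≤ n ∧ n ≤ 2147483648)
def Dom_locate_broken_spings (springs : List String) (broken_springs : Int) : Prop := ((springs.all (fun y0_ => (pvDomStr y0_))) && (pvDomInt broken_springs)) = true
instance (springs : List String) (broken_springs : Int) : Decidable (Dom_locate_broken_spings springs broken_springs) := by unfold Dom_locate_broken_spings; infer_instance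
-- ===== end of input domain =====

-- B replaces A's per-window slice + two count() passes by a prefix-sum array of good
-- ('#'/'?') positions, testing each window in O(1); same return value everywhere.

-- ===== PORT A =====
-- the for-loop with early return, as recursion over the range list
def pvLoopA (springs : List String) (b : Int) : List Int → Int
  | [] => -1
  | index :: rest =>
    let temp := PySem.List.slice springs (some index) (some (index + b))
    if ((PySem.List.count temp "#" : Int) + (PySem.List.count temp "?" : Int)) = b then
      if index - 1 ≥ 0 ∧ PySem.List.pyGetD springs (index - 1) "" = "#" then
        pvLoopA springs b rest
      else if index + b + 1 < (springs.length : Int) ∧ PySem.List.pyGetD springs (index + b + 1) "" = "#" then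
        pvLoopA springs b rest
      else index
    else pvLoopA springs b rest

def locate_broken_spings (springs : List String) (broken_springs : Int) : Int :=
  pvLoopA springs broken_springs (PySem.List.pyRange 0 ((springs.length : Int) - broken_springs) 1)

-- ===== PORT B =====
-- pref list built by the first loop of Source B
def pvPref (springs : List String) : List Int :=
  springs.foldl
    (fun pref s => pref ++ [PySem.List.pyGetD pref (-1) 0 + (if s = "#" ∨ s = "?" then 1 else 0)])
    [0]

def pvLoopB (springs : List String) (pref : List Int) (b : Int) : List Int → Int
  | [] => -1
  | i :: rest =>
    if PySem.List.pyGetD pref (i + b) 0 - PySem.List.pyGetD pref i 0 ≠ b then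
      pvLoopB springs pref b rest
    else if i ≥ 1 ∧ PySem.List.pyGetD springs (i - 1) "" = "#" then
      pvLoopB springs pref b rest
    else if i + b + 1 < (springs.length : Int) ∧ PySem.List.pyGetD springs (i + b + 1) "" = "#" then
      pvLoopB springs pref b rest
    else i

def locate_broken_spings_alt (springs : List String) (broken_springs : Int) : Int :=
  if broken_springs < 0 then -1
  else pvLoopB springs (pvPref springs) broken_springs
        (PySem.List.pyRange 0 ((springs.length : Int) - broken_springs) 1)

-- ===== PRECONDITION & SPEC =====
def Spec_locate_broken_spings (springs : List String) (broken_springs : Int) (out : Int) : Prop := out = locate_broken_spings_alt springs broken_springs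
instance (springs : List String) (broken_springs : Int) (out : Int) : Decidable (Spec_locate_broken_spings springs broken_springs out) := by unfold Spec_locate_broken_spings; infer_instance

-- ===== CLAIM (what is proved, stated in full; the proofs are below) =====
def Claim_equal_locate_broken_spings : Prop := ∀ (springs : List String) (broken_springs : Int), Dom_locate_broken_spings springs broken_springs → Spec_locate_broken_spings springs broken_springs (locate_broken_spings springs broken_springs)


-- ===== LEMMAS AND PROOFS =====

def pvGood (s : String) : Bool := s == "#" || s == "?"

def pvG (l : List String) : Int := (l.countP pvGood : Int)

-- the '#'-count plus '?'-count of a list is its count of good elements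
theorem pvCount_eq_countP (l : List String) :
    ((PySem.List.count l "#" : Int) + (PySem.List.count l "?" : Int)) = pvG l := by
  induction l with
  | nil => simp [PySem.List.count, pvG]
  | cons x xs ih =>
    simp only [PySem.List.count, pvG, List.count_cons, List.countP_cons] at *
    by_cases h1 : x = "#" <;> by_cases h2 : x = "?" <;>
      simp [h1, h2, pvGood] at * <;> omega

-- pvPref is the list of good-counts of the prefixes
theorem pvPref_eq (springs : List String) :
    pvPref springs = (List.range (springs.length + 1)).map (fun k => pvG (springs.take k)) := by
  induction springs using List.reverseRecOn with
  | nil => simp [pvPref, pvG]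
  | append_singleton l x ih =>
    have hfold : pvPref (l ++ [x]) =
        pvPref l ++ [PySem.List.pyGetD (pvPref l) (-1) 0 + (if x = "#" ∨ x = "?" then 1 else 0)] := by
      simp [pvPref, List.foldl_append]
    rw [hfold, ih]
    have hlast : PySem.List.pyGetD ((List.range (l.length + 1)).map (fun k => pvG (l.take k))) (-1) 0
        = pvG l := by
      rw [List.range_succ, List.map_append]
      simp [PySem.List.pyGetD_neg_one_append_singleton]
    rw [hlast]
    rw [List.length_append, List.length_singleton, List.range_succ (n := l.length + 1), List.map_append]
    congr 1
    · apply List.map_congr_left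
      intro k hk
      rw [List.mem_range] at hk
      rw [List.take_append_of_le_length (by omega)]
    · simp only [List.map_cons, List.map_nil, List.cons.injEq, and_true]
      rw [List.take_of_length_le (by simp)]
      simp only [pvG, List.countP_append, List.countP_cons, List.countP_nil]
      by_cases h1 : x = "#" <;> by_cases h2 : x = "?" <;>
        simp [h1, h2, pvGood]

-- B's O(1) prefix-difference window test computes A's window good-count
theorem pvWindow (springs : List String) (b i : Int) (hb : 0 ≤ b) (hi : 0 ≤ i)
    (hub : i + b ≤ (springs.length : Int)) :
    PySem.List.pyGetD (pvPref springs) (i + b) 0 - PySem.List.pyGetD (pvPref springs) i 0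
      = pvG (PySem.List.slice springs (some i) (some (i + b))) := by
  have hlen : (pvPref springs).length = springs.length + 1 := by
    rw [pvPref_eq]; simp
  have h1 : PySem.List.pyGetD (pvPref springs) (i + b) 0 = pvG (springs.take (i + b).toNat) := by
    rw [PySem.List.pyGetD_eq_getElem _ _ (by omega) (by rw [hlen]; push_cast; omega)]
    simp [pvPref_eq]
  have h2 : PySem.List.pyGetD (pvPref springs) i 0 = pvG (springs.take i.toNat) := by
    rw [PySem.List.pyGetD_eq_getElem _ _ (by omega) (by rw [hlen]; push_cast; omega)]
    simp [pvPref_eq]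
  have hslice : PySem.List.slice springs (some i) (some (i + b))
      = (springs.drop i.toNat).take b.toNat := by
    have : PySem.List.slice springs (some ((i.toNat : Nat) : Int))
        (some (((i.toNat : Nat) : Int) + ((b.toNat : Nat) : Int)))
        = (springs.drop i.toNat).take b.toNat := PySem.List.slice_natCast_add ..
    rw [← this]
    congr 2 <;> omega
  rw [h1, h2, hslice]
  have htk : (i + b).toNat = i.toNat + b.toNat := by omega
  rw [htk, List.take_add]
  simp only [pvG, List.countP_append]
  push_cast
  ring

-- A's loop never fires its window test when broken_springs is negative
theorem pvLoopA_neg (springs : List String) (b : Int) (hb : b < 0) :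
    ∀ l : List Int, pvLoopA springs b l = -1 := by
  intro l
  induction l with
  | nil => rfl
  | cons i rest ih =>
    have hcount : ¬ (((PySem.List.count (PySem.List.slice springs (some i) (some (i + b))) "#" : Int)
        + (PySem.List.count (PySem.List.slice springs (some i) (some (i + b))) "?" : Int)) = b) := by
      have h1 : (0:Int) ≤ (PySem.List.count (PySem.List.slice springs (some i) (some (i + b))) "#" : Int) := by positivity
      have h2 : (0:Int) ≤ (PySem.List.count (PySem.List.slice springs (some i) (some (i + b))) "?" : Int) := by positivity
      omega
    simp only [pvLoopA, if_neg hcount]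
    exact ih

-- the two loops agree index by index once the window tests are identified
theorem pvLoops_eq (springs : List String) (b : Int) (hb : 0 ≤ b) :
    ∀ l : List Int, (∀ i ∈ l, 0 ≤ i ∧ i + b ≤ (springs.length : Int)) →
      pvLoopA springs b l = pvLoopB springs (pvPref springs) b l := by
  intro l
  induction l with
  | nil => intro _; rfl
  | cons i rest ih =>
    intro hmem
    obtain ⟨hi, hub⟩ := hmem i (List.mem_cons_self ..)
    have hrest : ∀ j ∈ rest, 0 ≤ j ∧ j + b ≤ (springs.length : Int) := by
      intro j hj; exact hmem j (List.mem_cons_of_mem _ hj)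
    have hwin := pvWindow springs b i hb hi hub
    simp only [pvLoopA, pvLoopB, pvCount_eq_countP, hwin]
    by_cases hc : pvG (PySem.List.slice springs (some i) (some (i + b))) = b
    · rw [if_pos hc, if_neg (not_not_intro hc)]
      by_cases hn1 : i ≥ 1 ∧ PySem.List.pyGetD springs (i - 1) "" = "#"
      · rw [if_pos hn1, if_pos (show i - 1 ≥ 0 ∧ PySem.List.pyGetD springs (i - 1) "" = "#" from ⟨by omega, hn1.2⟩)]
        exact ih hrest
      · rw [if_neg hn1, if_neg (show ¬ (i - 1 ≥ 0 ∧ PySem.List.pyGetD springs (i - 1) "" = "#") from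
          fun h => hn1 ⟨by omega, h.2⟩)]
        by_cases hn2 : i + b + 1 < (springs.length : Int) ∧ PySem.List.pyGetD springs (i + b + 1) "" = "#"
        · rw [if_pos hn2, if_pos hn2]
          exact ih hrest
        · rw [if_neg hn2, if_neg hn2]
    · rw [if_neg hc, if_pos hc]
      exact ih hrest

-- ===== VERDICT (by name: the statement is the Claim_ definition above) =====
theorem locate_broken_spings_spec : Claim_equal_locate_broken_spings := by
  intro springs b _
  unfold Spec_locate_broken_spings locate_broken_spings locate_broken_spings_alt
  by_cases hb : b < 0
  · rw [if_pos hb, pvLoopA_neg springs b hb]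
  · rw [if_neg hb]
    apply pvLoops_eq springs b (by omega)
    intro i hi
    rw [PySem.List.mem_pyRange_one] at hi
    omega
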